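-- pv_equiv track=rewrite | github.com/Manby/Turing-Machine | TuringTkinterDev.py | checkInstructions
-- ===== SOURCE A (Python) =====
-- def checkInstructions(instructions):
-- 	for h, instruction in enumerate(instructions):
-- 		for i, part in enumerate(instruction):
-- 			#Current state and Next state
-- 			if i == 0 or i == 4:
-- 				if not part:
-- 					return (False, (h+1, i))
--
-- 			#Direction
-- 			if i == 3:
-- 				if not part in ['l', 'r']:
-- 					return (False, (h+1, i))
--
-- 	return (True, None)
-- ===== SOURCE B (Python) =====
-- def checkInstructions(instructions):
-- 	for h, instruction in enumerate(instructions):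
-- 		if len(instruction) > 0 and not instruction[0]:
-- 			return (False, (h + 1, 0))
-- 		if len(instruction) > 3 and instruction[3] not in ('l', 'r'):
-- 			return (False, (h + 1, 3))
-- 		if len(instruction) > 4 and not instruction[4]:
-- 			return (False, (h + 1, 4))
-- 	return (True, None)
-- ===== Notes on version B (the rewrite author's own statement) =====
-- stated objective: simpler
-- what changed: Replaced the inner enumerate-and-scan loop over every field with three direct length-guarded indexed checks (fields 0, 3, 4) per instruction.
import Mathlib
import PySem

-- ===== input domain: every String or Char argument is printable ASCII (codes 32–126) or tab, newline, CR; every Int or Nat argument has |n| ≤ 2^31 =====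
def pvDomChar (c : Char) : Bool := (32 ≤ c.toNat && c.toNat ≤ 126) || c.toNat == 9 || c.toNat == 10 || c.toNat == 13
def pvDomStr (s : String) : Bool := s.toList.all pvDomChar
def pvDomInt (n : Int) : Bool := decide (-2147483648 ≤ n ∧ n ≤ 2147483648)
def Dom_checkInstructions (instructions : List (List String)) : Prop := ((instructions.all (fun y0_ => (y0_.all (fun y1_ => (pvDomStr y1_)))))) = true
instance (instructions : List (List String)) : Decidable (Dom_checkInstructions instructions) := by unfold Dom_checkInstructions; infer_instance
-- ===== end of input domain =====

-- B drops the inner scan over all fields in favour of three direct length-guarded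
-- indexed checks per instruction (simpler decomposition; same return value).

-- ===== PORT A =====
-- inner 'for i, part in enumerate(instruction)' loop; 'some r' = early return r
def pvInnerA (h : Int) (i : Int) : List String → Option (Bool × (Option (Int × Int)))
  | [] => none
  | part :: rest =>
    if (i = 0 ∨ i = 4) ∧ part = "" then some (false, some (h + 1, i))
    else if i = 3 ∧ ¬(part = "l" ∨ part = "r") then some (false, some (h + 1, i))
    else pvInnerA h (i + 1) rest

-- outer 'for h, instruction in enumerate(instructions)' loop
def pvOuterA (h : Int) : List (List String) → Bool × (Option (Int × Int))
  | [] => (true, none)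
  | instruction :: rest =>
    match pvInnerA h 0 instruction with
    | some r => r
    | none => pvOuterA (h + 1) rest

def checkInstructions (instructions : List (List String)) : Bool × (Option (Int × Int)) :=
  pvOuterA 0 instructions

-- ===== PORT B =====
def pvOuterB (h : Int) : List (List String) → Bool × (Option (Int × Int))
  | [] => (true, none)
  | instruction :: rest =>
    if instruction.length > 0 ∧ instruction.getD 0 "" = "" then (false, some (h + 1, 0))
    else if instruction.length > 3 ∧ ¬(instruction.getD 3 "" = "l" ∨ instruction.getD 3 "" = "r") then (false, some (h + 1, 3))
    else if instruction.length > 4 ∧ instruction.getD 4 "" = "" then (false, some (h + 1, 4))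
    else pvOuterB (h + 1) rest

def checkInstructions_alt (instructions : List (List String)) : Bool × (Option (Int × Int)) :=
  pvOuterB 0 instructions

-- ===== PRECONDITION & SPEC =====
def Spec_checkInstructions (instructions : List (List String)) (out : Bool × (Option (Int × Int))) : Prop := out = checkInstructions_alt instructions
instance (instructions : List (List String)) (out : Bool × (Option (Int × Int))) : Decidable (Spec_checkInstructions instructions out) := by unfold Spec_checkInstructions; infer_instance

-- ===== CLAIM (what is proved, stated in full; the proofs are below) =====
def Claim_equal_checkInstructions : Prop := ∀ (instructions : List (List String)), Dom_checkInstructions instructions → Spec_checkInstructions instructions (checkInstructions instructions)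

-- ===== LEMMAS AND PROOFS =====

-- Past index 4 the inner loop of A can never fire a check.
theorem pvInnerA_ge_five (h : Int) : ∀ (xs : List String) (i : Int), 5 ≤ i → pvInnerA h i xs = none := by
  intro xs
  induction xs with
  | nil => intro i _; rfl
  | cons part rest ih =>
    intro i hi
    have h0 : ¬((i = 0 ∨ i = 4) ∧ part = "") := by
      rintro ⟨hi', _⟩; rcases hi' with h' | h' <;> omega
    have h3 : ¬(i = 3 ∧ ¬(part = "l" ∨ part = "r")) := by
      rintro ⟨hi', _⟩; omega
    rw [pvInnerA, if_neg h0, if_neg (by tauto)]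
    exact ih (i + 1) (by omega)

-- The inner loop of A equals B's three direct checks, per instruction.
theorem pvInner_eq (h : Int) (instruction : List String) :
    pvInnerA h 0 instruction =
      (if instruction.length > 0 ∧ instruction.getD 0 "" = "" then some (false, some (h + 1, (0 : Int)))
       else if instruction.length > 3 ∧ ¬(instruction.getD 3 "" = "l" ∨ instruction.getD 3 "" = "r") then some (false, some (h + 1, (3 : Int)))
       else if instruction.length > 4 ∧ instruction.getD 4 "" = "" then some (false, some (h + 1, (4 : Int)))
       else none) := by
  match instruction with
  | [] => simp [pvInnerA]
  | [a] =>
    by_cases ha : a = "" <;> simp [pvInnerA, ha]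
  | [a, b] =>
    by_cases ha : a = "" <;> simp [pvInnerA, ha]
  | [a, b, c] =>
    by_cases ha : a = "" <;> simp [pvInnerA, ha]
  | [a, b, c, d] =>
    by_cases ha : a = "" <;> by_cases hd : d = "l" ∨ d = "r" <;>
      simp [pvInnerA, ha, hd]
  | a :: b :: c :: d :: e :: rest =>
    have h5 := pvInnerA_ge_five h rest 5 (by omega)
    by_cases ha : a = "" <;> by_cases hd : d = "l" ∨ d = "r" <;> by_cases he : e = "" <;>
      simp [pvInnerA, ha, hd, he, h5]

theorem pvOuter_eq (instructions : List (List String)) : ∀ (h : Int), pvOuterA h instructions = pvOuterB h instructions := by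
  induction instructions with
  | nil => intro h; rfl
  | cons instruction rest ih =>
    intro h
    rw [pvOuterA, pvOuterB, pvInner_eq h instruction]
    split_ifs <;> simp [ih]

-- ===== VERDICT (by name: the statement is the Claim_ definition above) =====
theorem checkInstructions_spec : Claim_equal_checkInstructions := by
  intro instructions _
  unfold Spec_checkInstructions checkInstructions checkInstructions_alt
  exact pvOuter_eq instructions 0
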